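-- pv_equiv track=rewrite | github.com/globocom/dojo | 2024_01_10/dojo.py | return_number_in_line_right
-- ===== SOURCE A (Python) =====
-- def return_number_in_line_right(line, index):
--     if index < 0 or index == len(line) or not line[index].isnumeric():
--         return None
--
--     num = line[index]
--     ant_num = return_number_in_line_right(line, index + 1)
--     if ant_num is not None:
--         num += ant_num
--
--     return num
-- ===== SOURCE B (Python) =====
-- def return_number_in_line_right(line, index):
--     if index < 0 or index >= len(line) or not line[index].isnumeric():
--         return None
--     out = []
--     i = index
--     while i < len(line) and line[i].isnumeric():
--         out.append(line[i])
--         i += 1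
--     return ''.join(out)
-- ===== Notes on version B (the rewrite author's own statement) =====
-- stated objective: idiomatic
-- what changed: Replaced A's tail recursion (one call frame and one string concatenation per digit) by a single iterative forward scan that appends the digit run into a list and joins it once.
import Mathlib
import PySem

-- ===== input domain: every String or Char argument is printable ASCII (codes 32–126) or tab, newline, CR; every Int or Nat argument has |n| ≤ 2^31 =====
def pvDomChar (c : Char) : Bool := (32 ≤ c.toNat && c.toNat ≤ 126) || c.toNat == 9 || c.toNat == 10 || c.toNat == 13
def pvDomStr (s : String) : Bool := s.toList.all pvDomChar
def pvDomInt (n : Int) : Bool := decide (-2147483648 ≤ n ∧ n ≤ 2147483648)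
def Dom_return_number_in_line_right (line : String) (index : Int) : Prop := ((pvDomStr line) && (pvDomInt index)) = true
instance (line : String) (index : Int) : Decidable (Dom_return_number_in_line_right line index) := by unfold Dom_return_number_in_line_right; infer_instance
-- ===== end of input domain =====

-- B replaces A's tail recursion (one string concatenation per digit) by a single
-- iterative forward scan collecting the digit run; return values proved equal on Pre_.
-- Python's str.isnumeric agrees with PySem.Chars.isdigit on the ASCII domain Dom_.

-- ===== PORT A =====
-- recursion on the suffix: guard, take line[index], recurse at index+1, concatenate
def pvArec (cs : List Char) (index : Int) : Option (List Char) :=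
  if _h0 : index < 0 ∨ index = (cs.length : Int) then none
  else
    match _h1 : PySem.List.pyGet? cs index with
    | none => none        -- Python raises IndexError here (index > len); excluded by Pre_
    | some c =>
      if PySem.Chars.isdigit c = false then none
      else
        match pvArec cs (index + 1) with
        | none => some [c]
        | some rest => some (c :: rest)
termination_by (cs.length - index.toNat)
decreasing_by
  have hin : PySem.Raise.InRange cs.length index := by
    by_contra hc
    rw [← PySem.List.pyGet?_eq_none_iff (xs := cs)] at hc
    simp [hc] at _h1
  simp only [PySem.Raise.InRange] at hin
  omega

def return_number_in_line_right (line : String) (index : Int) : Option String :=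
  (pvArec line.toList index).map (fun cs => String.ofList cs)

-- ===== PORT B =====
-- the while loop: append digits to out while i < len and line[i] is numeric (short-circuit)
def pvBloop (cs : List Char) (i : Nat) (out : List Char) : List Char :=
  if h : i < cs.length then
    if PySem.Chars.isdigit cs[i] then pvBloop cs (i + 1) (out ++ [cs[i]]) else out
  else out
termination_by cs.length - i

def return_number_in_line_right_alt (line : String) (index : Int) : Option String :=
  let cs := line.toList
  if h : 0 ≤ index ∧ index < (cs.length : Int) then
    if PySem.Chars.isdigit (cs[index.toNat]'(by omega)) then
      some (String.ofList (pvBloop cs index.toNat []))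
    else none
  else none

-- ===== PRECONDITION & SPEC =====
-- Pre_ excludes index > len(line), where Python A raises IndexError.
def Pre_return_number_in_line_right (line : String) (index : Int) : Prop :=
  index ≤ (line.toList.length : Int)
instance (line : String) (index : Int) : Decidable (Pre_return_number_in_line_right line index) := by
  unfold Pre_return_number_in_line_right; infer_instance

def pvWitness_return_number_in_line_right : String × Int := ("a12b", 1)

def Spec_return_number_in_line_right (line : String) (index : Int) (out : Option String) : Prop :=
  out = return_number_in_line_right_alt line index
instance (line : String) (index : Int) (out : Option String) : Decidable (Spec_return_number_in_line_right line index out) := by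
  unfold Spec_return_number_in_line_right; infer_instance

-- ===== CLAIM (what is proved, stated in full; the proofs are below) =====
def Claim_equal_return_number_in_line_right : Prop := ∀ (line : String) (index : Int), Dom_return_number_in_line_right line index → Pre_return_number_in_line_right line index → Spec_return_number_in_line_right line index (return_number_in_line_right line index)

-- ===== LEMMAS AND PROOFS =====

-- A's recursion, started at a Nat index, produces the takeWhile-digit run of the suffix
theorem pvArec_eq (cs : List Char) (i : Nat) :
    pvArec cs (i : Int) =
      if h : i < cs.length then
        (if PySem.Chars.isdigit cs[i] then
          some ((cs.drop i).takeWhile PySem.Chars.isdigit)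
        else none)
      else none := by
  induction hn : cs.length - i using Nat.strong_induction_on generalizing i with
  | _ n ih =>
    rw [pvArec]
    by_cases hlt : i < cs.length
    · have hg : ¬ ((i : Int) < 0 ∨ (i : Int) = (cs.length : Int)) := by
        omega
      rw [dif_neg hg, dif_pos hlt]
      split
      · next h1 =>
        rw [PySem.List.pyGet?_natCast, List.getElem?_eq_getElem hlt] at h1
        exact absurd h1 (by simp)
      · next c h1 =>
        rw [PySem.List.pyGet?_natCast, List.getElem?_eq_getElem hlt] at h1
        obtain rfl : cs[i] = c := by injection h1
        have hdrop : cs.drop i = cs[i] :: cs.drop (i + 1) :=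
          List.drop_eq_getElem_cons hlt
        by_cases hd : PySem.Chars.isdigit cs[i]
        · rw [if_neg (by simp [hd]), if_pos hd]
          have hrec : ((i : Int) + 1) = ((i + 1 : Nat) : Int) := by push_cast; ring
          rw [hrec, ih (cs.length - (i + 1)) (by omega) (i + 1) rfl]
          by_cases h2 : i + 1 < cs.length
          · by_cases hd2 : PySem.Chars.isdigit cs[i + 1]
            · have hdrop2 : cs.drop (i + 1) = cs[i + 1] :: cs.drop (i + 2) :=
                List.drop_eq_getElem_cons h2
              rw [dif_pos h2, if_pos hd2, hdrop, List.takeWhile_cons, if_pos hd]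
            · have hdrop2 : cs.drop (i + 1) = cs[i + 1] :: cs.drop (i + 2) :=
                List.drop_eq_getElem_cons h2
              rw [dif_pos h2, if_neg hd2, hdrop, List.takeWhile_cons, if_pos hd,
                hdrop2, List.takeWhile_cons, if_neg hd2]
          · rw [dif_neg h2]
            have hnil : cs.drop (i + 1) = [] := List.drop_eq_nil_of_le (by omega)
            rw [hdrop, List.takeWhile_cons, if_pos hd, hnil, List.takeWhile_nil]
        · rw [if_pos (by simp [hd]), if_neg hd]
    · rw [dif_neg hlt]
      by_cases heq : i = cs.length
      · rw [dif_pos (Or.inr (by omega))]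
      · have hg : ¬ ((i : Int) < 0 ∨ (i : Int) = (cs.length : Int)) := by
          omega
        rw [dif_neg hg]
        split
        · rfl
        · next c h1 =>
          have hnone : PySem.List.pyGet? cs (i : Int) = none := by
            rw [PySem.List.pyGet?_eq_none_iff]
            simp only [PySem.Raise.InRange]
            omega
          rw [hnone] at h1
          exact absurd h1 (by simp)

-- B's loop appends the takeWhile-digit run of the suffix to the accumulator
theorem pvBloop_eq (cs : List Char) (i : Nat) (out : List Char) :
    pvBloop cs i out = out ++ (cs.drop i).takeWhile PySem.Chars.isdigit := by
  induction hn : cs.length - i using Nat.strong_induction_on generalizing i out with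
  | _ n ih =>
    rw [pvBloop]
    by_cases h : i < cs.length
    · have hdrop : cs.drop i = cs[i] :: cs.drop (i + 1) :=
        List.drop_eq_getElem_cons h
      rw [dif_pos h]
      by_cases hd : PySem.Chars.isdigit cs[i]
      · rw [if_pos hd, ih (cs.length - (i + 1)) (by omega) (i + 1) _ rfl,
          hdrop, List.takeWhile_cons, if_pos hd]
        simp [List.append_assoc]
      · rw [if_neg hd, hdrop, List.takeWhile_cons, if_neg hd]
        simp
    · rw [dif_neg h]
      simp [List.drop_eq_nil_of_le (by omega : cs.length ≤ i)]

-- the two ports agree on every input with index ≤ len (Pre_); stated on the char list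
theorem ports_agree (cs : List Char) (index : Int) :
    (pvArec cs index).map (fun l => String.ofList l) =
      (if h : 0 ≤ index ∧ index < (cs.length : Int) then
        (if PySem.Chars.isdigit (cs[index.toNat]'(by omega)) then
          some (String.ofList (pvBloop cs index.toNat []))
        else none)
      else none) := by
  by_cases hneg : index < 0
  · rw [pvArec, dif_pos (Or.inl hneg), dif_neg (by omega)]
    rfl
  · obtain ⟨i, rfl⟩ : ∃ i : Nat, index = (i : Int) := ⟨index.toNat, by omega⟩
    rw [pvArec_eq cs i]
    by_cases hlt : i < cs.length
    · have hb : 0 ≤ ((i : Nat) : Int) ∧ ((i : Nat) : Int) < (cs.length : Int) := by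
        constructor <;> omega
      rw [dif_pos hlt, dif_pos hb]
      have htn : (((i : Nat) : Int)).toNat = i := by omega
      by_cases hd : PySem.Chars.isdigit cs[i]
      · rw [if_pos hd, if_pos (by simp [htn, hd]), pvBloop_eq]
        simp [htn]
      · rw [if_neg hd, if_neg (by simp [htn, hd])]
        rfl
    · rw [dif_neg hlt, dif_neg (by omega)]
      rfl

-- ===== VERDICT (by name: the statement is the Claim_ definition above) =====
theorem return_number_in_line_right_spec : Claim_equal_return_number_in_line_right := by
  intro line index _hdom _hpre
  unfold Spec_return_number_in_line_right return_number_in_line_right return_number_in_line_right_alt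
  exact ports_agree line.toList index
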